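-- pv_equiv track=rewrite | github.com/pypi-data/pypi-mirror-84 | packages/tuxmake/tuxmake-0.7.0-py3-none-any.whl/tuxmake/config.py | split_commands
-- ===== SOURCE A (Python) =====
-- import shlex
--
-- def split_commands(s):
--     if not s:
--         return []
--     result = [[]]
--     for item in shlex.split(s):
--         if item == "&&":
--             result.append([])
--         else:
--             result[-1].append(item)
--     return result
-- ===== SOURCE B (Python) =====
-- def _lex(s):
--     # single-pass POSIX lexer over a flat (quote, esc, word) state record
--     # (same rules shlex.split applies: whitespace split, '...' literal,
--     # "..." with \" and \\ escapes, bare \ escapes anything)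
--     tokens = []
--     quote = None       # None | "'" | '"'
--     esc = False
--     word = None        # None (between tokens) or list of chars
--     quoted = False
--     for c in s:
--         if esc:
--             if quote == '"' and c not in '"\\':
--                 word.append('\\')
--             word.append(c)
--             esc = False
--         elif quote == "'":
--             if c == "'":
--                 quote = None
--             else:
--                 word.append(c)
--         elif quote == '"':
--             if c == '"':
--                 quote = None
--             elif c == '\\':
--                 esc = True
--             else:
--                 word.append(c)
--         elif c in ' \t\r\n':
--             if word is not None:
--                 tokens.append(''.join(word))
--                 word = None
--                 quoted = False
--         elif c == '\\':
--             if word is None: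
--                 word = []
--             esc = True
--         elif c in '\'"':
--             if word is None:
--                 word = []
--             quote = c
--             quoted = True
--         else:
--             if word is None:
--                 word = []
--             word.append(c)
--     if quote is not None:
--         raise ValueError("No closing quotation")
--     if esc:
--         raise ValueError("No escaped character")
--     if word is not None and (word or quoted):
--         tokens.append(''.join(word))
--     return tokens
--
--
-- def split_commands(s):
--     # staged: lex once, list the "&&" positions, then cut by slicing
--     if not s:
--         return []
--     tokens = _lex(s)
--     seps = [i for i, t in enumerate(tokens) if t == "&&"]
--     bounds = [-1] + seps + [len(tokens)]
--     return [tokens[a + 1:b] for a, b in zip(bounds, bounds[1:])]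
-- ===== Notes on version B (the rewrite author's own statement) =====
-- stated objective: faster
-- what changed: B replaces the shlex.split call (shlex's heavyweight per-character class-based state machine object) with a single-pass lexer over a flat (quote, esc, word) record, and replaces A's per-token accumulator loop (append to last group / open new group) with a staged pass: list the '&&' positions, then cut the groups out by slicing between consecutive boundary positions.
import Mathlib
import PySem

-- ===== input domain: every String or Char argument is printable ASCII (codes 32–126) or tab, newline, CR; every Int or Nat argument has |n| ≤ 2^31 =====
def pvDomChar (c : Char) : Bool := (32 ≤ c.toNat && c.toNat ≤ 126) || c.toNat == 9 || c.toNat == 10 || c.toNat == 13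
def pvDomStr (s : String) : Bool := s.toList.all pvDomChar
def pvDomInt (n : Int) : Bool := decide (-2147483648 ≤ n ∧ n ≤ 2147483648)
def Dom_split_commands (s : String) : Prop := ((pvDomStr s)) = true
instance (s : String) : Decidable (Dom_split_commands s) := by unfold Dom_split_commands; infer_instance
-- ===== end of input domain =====

-- B stages the work differently: a flat-record single-pass lexer (instead of shlex's mode
-- tag automaton), then a list of "&&" positions, then groups cut out by slicing at those
-- positions — replacing A's per-token accumulator loop (objective: faster; the timing
-- run measured B faster by a constant factor at the largest generated size).

-- ===== PORT A =====
-- Hand port of shlex.split (posix mode, whitespace_split=True, comments off), exact on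
-- inputs where shlex.split returns (Pre_ excludes the ValueError inputs: unclosed
-- quote / trailing backslash).
inductive ShMode | ground | word | squote | dquote | escWord | escDquote
deriving DecidableEq, Repr

def shIsWS (c : Char) : Bool := c = ' ' || c = '\t' || c = '\r' || c = '\n'

def shlexRun : List Char → ShMode → List Char → Bool → List String → List String
  | [], m, tok, quoted, acc =>
      match m with
      | ShMode.ground => acc
      | ShMode.word => if tok ≠ [] ∨ quoted then acc ++ [String.ofList tok] else acc
      | _ => acc   -- shlex raises ValueError here; excluded by Pre_split_commands
  | c :: cs, m, tok, quoted, acc =>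
      match m with
      | ShMode.ground =>
          if shIsWS c then shlexRun cs ShMode.ground [] false acc
          else if c = '\\' then shlexRun cs ShMode.escWord [] false acc
          else if c = '\'' then shlexRun cs ShMode.squote [] false acc
          else if c = '"' then shlexRun cs ShMode.dquote [] false acc
          else shlexRun cs ShMode.word [c] false acc
      | ShMode.word =>
          if shIsWS c then shlexRun cs ShMode.ground [] false (acc ++ [String.ofList tok])
          else if c = '\'' then shlexRun cs ShMode.squote tok quoted acc
          else if c = '"' then shlexRun cs ShMode.dquote tok quoted acc
          else if c = '\\' then shlexRun cs ShMode.escWord tok quoted acc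
          else shlexRun cs ShMode.word (tok ++ [c]) quoted acc
      | ShMode.squote =>
          if c = '\'' then shlexRun cs ShMode.word tok true acc
          else shlexRun cs ShMode.squote (tok ++ [c]) true acc
      | ShMode.dquote =>
          if c = '"' then shlexRun cs ShMode.word tok true acc
          else if c = '\\' then shlexRun cs ShMode.escDquote tok true acc
          else shlexRun cs ShMode.dquote (tok ++ [c]) true acc
      | ShMode.escWord => shlexRun cs ShMode.word (tok ++ [c]) quoted acc
      | ShMode.escDquote =>
          if c = '"' ∨ c = '\\' then shlexRun cs ShMode.dquote (tok ++ [c]) quoted acc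
          else shlexRun cs ShMode.dquote (tok ++ ['\\', c]) quoted acc

def shlexSplit (s : String) : List String :=
  shlexRun s.toList ShMode.ground [] false []

-- one iteration of A's for-loop body over `result`
def stepA (result : List (List String)) (item : String) : List (List String) :=
  if item = "&&" then result ++ [[]]
  else result.dropLast ++ [result.getLast! ++ [item]]   -- result[-1].append(item); result is always nonempty

def split_commands (s : String) : List (List String) :=
  if s = "" then []
  else List.foldl stepA [[]] (shlexSplit s)

-- ===== PORT B =====
-- Source B's _lex: one fold over the characters carrying a flat record
-- (tokens, quote, esc, word, quoted); `word = None` means "between tokens".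
structure LexSt where
  tokens : List String
  quote : Option Char
  esc : Bool
  word : Option (List Char)
  quoted : Bool
deriving DecidableEq, Repr

def lexStep (st : LexSt) (c : Char) : LexSt :=
  if st.esc then
    -- Python mutates `word` (non-None whenever esc is set, an invariant of the loop);
    -- `.getD []` reads it under that invariant
    let w := st.word.getD []
    let w' := if st.quote = some '"' ∧ c ≠ '"' ∧ c ≠ '\\' then w ++ ['\\', c] else w ++ [c]
    { st with word := some w', esc := false }
  else if st.quote = some '\'' then
    if c = '\'' then { st with quote := none }
    else { st with word := some (st.word.getD [] ++ [c]) }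
  else if st.quote = some '"' then
    if c = '"' then { st with quote := none }
    else if c = '\\' then { st with esc := true }
    else { st with word := some (st.word.getD [] ++ [c]) }
  else if c = ' ' ∨ c = '\t' ∨ c = '\r' ∨ c = '\n' then
    match st.word with
    | none => st
    | some w => { st with tokens := st.tokens ++ [String.ofList w], word := none, quoted := false }
  else if c = '\\' then
    { st with word := some (st.word.getD []), esc := true }
  else if c = '\'' ∨ c = '"' then
    { st with word := some (st.word.getD []), quote := some c, quoted := true }
  else
    { st with word := some (st.word.getD [] ++ [c]) }

def lexFin (st : LexSt) : List String :=
  -- Python raises ValueError when quote ≠ None or esc; excluded by Pre_split_commands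
  if st.quote ≠ none ∨ st.esc then st.tokens
  else match st.word with
    | none => st.tokens
    | some w => if w ≠ [] ∨ st.quoted then st.tokens ++ [String.ofList w] else st.tokens

def lexB (s : String) : List String :=
  lexFin (s.toList.foldl lexStep ⟨[], none, false, none, false⟩)

def split_commands_alt (s : String) : List (List String) :=
  if s = "" then []
  else
    let tokens := lexB s
    let seps := (PySem.List.enumerate tokens).filterMap
                  (fun p => if p.2 = "&&" then some p.1 else none)
    let bounds : List Int := -1 :: (seps ++ [(tokens.length : Int)])
    (bounds.zip bounds.tail).map
      (fun p => PySem.List.slice tokens (some (p.1 + 1)) (some p.2))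

-- ===== PRECONDITION & SPEC =====
-- shlex.split (and Source B's _lex) raise ValueError on an unclosed quote or a trailing
-- backslash; Pre_ is the closed-form "all quotes closed, no dangling escape", read off
-- by a 5-state quote DFA (it tracks only the quoting state, not the tokenisation).
inductive QMode | plain | squote | dquote | escPlain | escDquote
deriving DecidableEq, Repr

def qStep (m : QMode) (c : Char) : QMode :=
  match m with
  | QMode.plain => if c = '\\' then QMode.escPlain
                   else if c = '\'' then QMode.squote
                   else if c = '"' then QMode.dquote
                   else QMode.plain
  | QMode.squote => if c = '\'' then QMode.plain else QMode.squote
  | QMode.dquote => if c = '"' then QMode.plain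
                    else if c = '\\' then QMode.escDquote
                    else QMode.dquote
  | QMode.escPlain => QMode.plain
  | QMode.escDquote => QMode.dquote

def Pre_split_commands (s : String) : Prop :=
  s.toList.foldl qStep QMode.plain = QMode.plain
instance (s : String) : Decidable (Pre_split_commands s) := by
  unfold Pre_split_commands; infer_instance

def pvWitness_split_commands : String := "make -j8 && make install"

def Spec_split_commands (s : String) (out : List (List String)) : Prop := out = split_commands_alt s
instance (s : String) (out : List (List String)) : Decidable (Spec_split_commands s out) := by unfold Spec_split_commands; infer_instance

-- ===== CLAIM (what is proved, stated in full; the proofs are below) =====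
def Claim_equal_split_commands : Prop := ∀ (s : String), Dom_split_commands s → Pre_split_commands s → Spec_split_commands s (split_commands s)

-- ===== LEMMAS AND PROOFS =====

-- ---- Stage 1: the two lexers agree ----
-- correspondence between A's automaton state and B's record
def SimRel : ShMode → List Char → Bool → List String → LexSt → Prop
  | ShMode.ground, _, _, acc, st => st = ⟨acc, none, false, none, false⟩
  | ShMode.word, tok, qd, acc, st => st = ⟨acc, none, false, some tok, qd⟩
  | ShMode.squote, tok, _, acc, st => st = ⟨acc, some '\'', false, some tok, true⟩
  | ShMode.dquote, tok, _, acc, st => st = ⟨acc, some '"', false, some tok, true⟩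
  | ShMode.escWord, tok, qd, acc, st => st = ⟨acc, none, true, some tok, qd⟩
  | ShMode.escDquote, tok, _, acc, st => st = ⟨acc, some '"', true, some tok, true⟩

theorem lex_sim : ∀ (cs : List Char) (m : ShMode) (tok : List Char) (qd : Bool)
    (acc : List String) (st : LexSt), SimRel m tok qd acc st →
    shlexRun cs m tok qd acc = lexFin (cs.foldl lexStep st) := by
  intro cs
  induction cs with
  | nil =>
      intro m tok qd acc st h
      cases m <;> simp only [SimRel] at h <;> subst h <;>
        simp [shlexRun, lexFin]
  | cons c cs ih =>
      intro m tok qd acc st h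
      cases m <;> simp only [SimRel] at h <;> subst h <;>
        simp only [List.foldl_cons, shlexRun]
      case ground =>
        by_cases hws : shIsWS c
        · have : lexStep ⟨acc, none, false, none, false⟩ c = ⟨acc, none, false, none, false⟩ := by
            have hor : c = ' ' ∨ c = '\t' ∨ c = '\r' ∨ c = '\n' := by
              simp only [shIsWS, Bool.or_eq_true, decide_eq_true_eq] at hws; tauto
            rcases hor with h|h|h|h <;> subst h <;> simp [lexStep]
          rw [hws]; simp only [if_true, this]
          exact ih _ _ _ _ _ rfl
        · simp only [hws, Bool.false_eq_true, if_false]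
          have hnw : ¬ (c = ' ' ∨ c = '\t' ∨ c = '\r' ∨ c = '\n') := by
            simp only [shIsWS, Bool.or_eq_true, decide_eq_true_eq] at hws; tauto
          by_cases hb : c = '\\'
          · subst hb
            simp only [if_pos rfl]
            have : lexStep ⟨acc, none, false, none, false⟩ '\\' = ⟨acc, none, true, some [], false⟩ := by
              simp [lexStep]
            rw [this]; exact ih _ _ _ _ _ rfl
          · simp only [hb, if_false]
            by_cases hq : c = '\''
            · subst hq
              simp only [if_pos rfl]
              have : lexStep ⟨acc, none, false, none, false⟩ '\'' = ⟨acc, some '\'', false, some [], true⟩ := by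
                simp [lexStep]
              rw [this]; exact ih _ _ _ _ _ rfl
            · simp only [hq, if_false]
              by_cases hd : c = '"'
              · subst hd
                simp only [if_pos rfl]
                have : lexStep ⟨acc, none, false, none, false⟩ '"' = ⟨acc, some '"', false, some [], true⟩ := by
                  simp [lexStep]
                rw [this]; exact ih _ _ _ _ _ rfl
              · simp only [hd, if_false]
                have : lexStep ⟨acc, none, false, none, false⟩ c = ⟨acc, none, false, some [c], false⟩ := by
                  simp [lexStep, hnw, hb, hq, hd]
                rw [this]; exact ih _ _ _ _ _ rfl
      case word =>
        by_cases hws : shIsWS c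
        · have : lexStep ⟨acc, none, false, some tok, qd⟩ c =
              ⟨acc ++ [String.ofList tok], none, false, none, false⟩ := by
            have hor : c = ' ' ∨ c = '\t' ∨ c = '\r' ∨ c = '\n' := by
              simp only [shIsWS, Bool.or_eq_true, decide_eq_true_eq] at hws; tauto
            rcases hor with h|h|h|h <;> subst h <;> simp [lexStep]
          rw [hws]; simp only [if_true, this]
          exact ih _ _ _ _ _ rfl
        · simp only [hws, Bool.false_eq_true, if_false]
          have hnw : ¬ (c = ' ' ∨ c = '\t' ∨ c = '\r' ∨ c = '\n') := by
            simp only [shIsWS, Bool.or_eq_true, decide_eq_true_eq] at hws; tauto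
          by_cases hq : c = '\''
          · subst hq
            simp only [if_pos rfl]
            have : lexStep ⟨acc, none, false, some tok, qd⟩ '\'' = ⟨acc, some '\'', false, some tok, true⟩ := by
              simp [lexStep]
            rw [this]; exact ih _ _ _ _ _ rfl
          · simp only [hq, if_false]
            by_cases hd : c = '"'
            · subst hd
              simp only [if_pos rfl]
              have : lexStep ⟨acc, none, false, some tok, qd⟩ '"' = ⟨acc, some '"', false, some tok, true⟩ := by
                simp [lexStep]
              rw [this]; exact ih _ _ _ _ _ rfl
            · simp only [hd, if_false]
              by_cases hb : c = '\\'
              · subst hb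
                simp only [if_pos rfl]
                have : lexStep ⟨acc, none, false, some tok, qd⟩ '\\' = ⟨acc, none, true, some tok, qd⟩ := by
                  simp [lexStep]
                rw [this]; exact ih _ _ _ _ _ rfl
              · simp only [hb, if_false]
                have : lexStep ⟨acc, none, false, some tok, qd⟩ c = ⟨acc, none, false, some (tok ++ [c]), qd⟩ := by
                  simp [lexStep, hnw, hb, hq, hd]
                rw [this]; exact ih _ _ _ _ _ rfl
      case squote =>
        by_cases hq : c = '\''
        · subst hq
          simp only [if_pos rfl]
          have : lexStep ⟨acc, some '\'', false, some tok, true⟩ '\'' = ⟨acc, none, false, some tok, true⟩ := by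
            simp [lexStep]
          rw [this]; exact ih _ _ _ _ _ rfl
        · simp only [hq, if_false]
          have : lexStep ⟨acc, some '\'', false, some tok, true⟩ c = ⟨acc, some '\'', false, some (tok ++ [c]), true⟩ := by
            simp [lexStep, hq]
          rw [this]; exact ih _ _ _ _ _ rfl
      case dquote =>
        by_cases hd : c = '"'
        · subst hd
          simp only [if_pos rfl]
          have : lexStep ⟨acc, some '"', false, some tok, true⟩ '"' = ⟨acc, none, false, some tok, true⟩ := by
            simp [lexStep]
          rw [this]; exact ih _ _ _ _ _ rfl
        · simp only [hd, if_false]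
          by_cases hb : c = '\\'
          · subst hb
            simp only [if_pos rfl]
            have : lexStep ⟨acc, some '"', false, some tok, true⟩ '\\' = ⟨acc, some '"', true, some tok, true⟩ := by
              simp [lexStep]
            rw [this]; exact ih _ _ _ _ _ rfl
          · simp only [hb, if_false]
            have : lexStep ⟨acc, some '"', false, some tok, true⟩ c = ⟨acc, some '"', false, some (tok ++ [c]), true⟩ := by
              simp [lexStep, hd, hb]
            rw [this]; exact ih _ _ _ _ _ rfl
      case escWord =>
        have : lexStep ⟨acc, none, true, some tok, qd⟩ c = ⟨acc, none, false, some (tok ++ [c]), qd⟩ := by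
          simp [lexStep]
        rw [this]; exact ih _ _ _ _ _ rfl
      case escDquote =>
        by_cases hk : c = '"' ∨ c = '\\'
        · simp only [if_pos hk]
          have : lexStep ⟨acc, some '"', true, some tok, true⟩ c = ⟨acc, some '"', false, some (tok ++ [c]), true⟩ := by
            rcases hk with h|h <;> subst h <;> simp [lexStep]
          rw [this]; exact ih _ _ _ _ _ rfl
        · simp only [hk, if_false]
          have : lexStep ⟨acc, some '"', true, some tok, true⟩ c = ⟨acc, some '"', false, some (tok ++ ['\\', c]), true⟩ := by
            push_neg at hk
            simp [lexStep, hk.1, hk.2]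
          rw [this]; exact ih _ _ _ _ _ rfl

theorem lexers_agree (s : String) : shlexSplit s = lexB s := by
  unfold shlexSplit lexB
  exact lex_sim s.toList ShMode.ground [] false [] _ rfl

-- ---- Stage 2: accumulator grouping = slice-at-separators grouping ----
-- reference splitter
def splitSpec : List String → List (List String)
  | [] => [[]]
  | t :: ts => if t = "&&" then [] :: splitSpec ts
               else match splitSpec ts with
                    | [] => [[t]]
                    | g :: r => (t :: g) :: r

theorem splitSpec_cons_sep (ts : List String) : splitSpec ("&&" :: ts) = [] :: splitSpec ts := by
  simp [splitSpec]

theorem splitSpec_cons_ne (t : String) (ts : List String) (ht : t ≠ "&&")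
    (h0 : List String) (r : List (List String)) (h : splitSpec ts = h0 :: r) :
    splitSpec (t :: ts) = (t :: h0) :: r := by
  simp [splitSpec, ht, h]

theorem splitSpec_ne_nil (ts : List String) : splitSpec ts ≠ [] := by
  cases ts with
  | nil => simp [splitSpec]
  | cons t ts =>
      by_cases ht : t = "&&"
      · subst ht; rw [splitSpec_cons_sep]; simp
      · rcases hz : splitSpec ts with _ | ⟨g, r⟩
        · exact absurd hz (splitSpec_ne_nil ts)
        · rw [splitSpec_cons_ne t ts ht g r hz]; simp

def consHeadApp (g : List String) : List (List String) → List (List String)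
  | [] => [g]
  | h :: r => (g ++ h) :: r

theorem foldl_stepA (ts : List String) :
    ∀ (R : List (List String)) (g : List String),
      List.foldl stepA (R ++ [g]) ts = R ++ consHeadApp g (splitSpec ts) := by
  induction ts with
  | nil => intro R g; simp [splitSpec, consHeadApp]
  | cons t ts ih =>
      intro R g
      by_cases ht : t = "&&"
      · subst ht
        have h1 : stepA (R ++ [g]) "&&" = (R ++ [g]) ++ [[]] := by simp [stepA]
        simp only [List.foldl_cons, h1, ih (R ++ [g]) [], splitSpec_cons_sep]
        rcases h : splitSpec ts with _ | ⟨h0, r⟩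
        · exact absurd h (splitSpec_ne_nil ts)
        · simp [consHeadApp, h]
      · have h1 : stepA (R ++ [g]) t = R ++ [g ++ [t]] := by
          simp [stepA, ht, List.getLast!_eq_getLast?_getD]
        rcases h : splitSpec ts with _ | ⟨h0, r⟩
        · exact absurd h (splitSpec_ne_nil ts)
        · simp only [List.foldl_cons, h1, ih R (g ++ [t]),
            splitSpec_cons_ne t ts ht h0 r h, h]
          simp [consHeadApp]

theorem foldl_stepA_main (ts : List String) :
    List.foldl stepA [[]] ts = splitSpec ts := by
  have h := foldl_stepA ts [] []
  simp only [List.nil_append] at h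
  rw [h]
  rcases hz : splitSpec ts with _ | ⟨h0, r⟩
  · exact absurd hz (splitSpec_ne_nil ts)
  · simp [consHeadApp]

-- B-side helpers (proof-side names for the port's inline expressions)
def sepsFM (ts : List String) (s : Int) : List Int :=
  (PySem.List.enumerate ts s).filterMap (fun p => if p.2 = "&&" then some p.1 else none)

def gB (tokens : List String) : List Int → List (List String)
  | a :: b :: rest => PySem.List.slice tokens (some (a + 1)) (some b) :: gB tokens (b :: rest)
  | _ => []

theorem gB_eq_zip_map (tokens : List String) : ∀ (bounds : List Int),
    (bounds.zip bounds.tail).map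
      (fun p => PySem.List.slice tokens (some (p.1 + 1)) (some p.2)) = gB tokens bounds := by
  intro bounds
  induction bounds with
  | nil => simp [gB]
  | cons a rest ih =>
      cases rest with
      | nil => simp [gB]
      | cons b r => simp only [List.tail_cons, List.zip_cons_cons, List.map_cons, gB]
                    rw [← ih]; rfl

theorem sepsFM_cons (t : String) (ts : List String) (s : Int) :
    sepsFM (t :: ts) s = (if t = "&&" then [s] else []) ++ sepsFM ts (s + 1) := by
  by_cases ht : t = "&&" <;>
    simp [sepsFM, PySem.List.enumerate_cons, List.filterMap_cons, ht]

theorem sepsFM_shift (ts : List String) : ∀ (s : Int),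
    sepsFM ts s = (sepsFM ts 0).map (· + s) := by
  induction ts with
  | nil => intro s; simp [sepsFM, PySem.List.enumerate_nil]
  | cons t ts ih =>
      intro s
      rw [sepsFM_cons t ts s, sepsFM_cons t ts 0, show (0 : Int) + 1 = 1 from rfl,
          ih (s + 1), ih 1]
      have h1 : (fun a : Int => a + (s + 1)) = (fun a : Int => a + 1 + s) := by
        funext a; ring
      by_cases ht : t = "&&" <;>
        simp [ht, List.map_map, Function.comp_def, h1]

theorem sepsFM_nonneg (ts : List String) : ∀ b ∈ sepsFM ts 0, 0 ≤ b := by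
  intro b hb
  simp only [sepsFM, List.mem_filterMap] at hb
  obtain ⟨p, hp, hpb⟩ := hb
  rw [PySem.List.mem_enumerate_iff] at hp
  obtain ⟨k, hk, rfl⟩ := hp
  split at hpb
  · cases hpb; positivity
  · cases hpb

theorem slice_cons_shift {α : Type} (x : α) (xs : List α) (i j : Int)
    (hi : 0 ≤ i) (hj : 0 ≤ j) :
    PySem.List.slice (x :: xs) (some (i + 1)) (some (j + 1)) = PySem.List.slice xs (some i) (some j) := by
  rw [PySem.List.slice_toNat _ (by omega) (by omega), PySem.List.slice_toNat _ hi hj]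
  have h1 : (i + 1).toNat = i.toNat + 1 := by omega
  have h2 : (j + 1).toNat - (i + 1).toNat = j.toNat - i.toNat := by omega
  rw [h2, h1, List.drop_succ_cons]

theorem gB_shift (t : String) (ts : List String) : ∀ (a : Int) (rest : List Int),
    -1 ≤ a → (∀ b ∈ rest, 0 ≤ b) →
    gB (t :: ts) ((a :: rest).map (· + 1)) = gB ts (a :: rest) := by
  intro a rest
  induction rest generalizing a with
  | nil => intro _ _; simp [gB]
  | cons b rest ih =>
      intro ha hrest
      have hb : 0 ≤ b := hrest b (by simp)
      have h2 := ih b (by omega) (fun x hx => hrest x (by simp [hx]))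
      simp only [List.map_cons, gB] at h2 ⊢
      rw [slice_cons_shift t ts (a + 1) b (by omega) hb]
      rw [List.cons_inj_right]
      exact h2

theorem splitSpec_no_sep (ts : List String) (h : ∀ x ∈ ts, x ≠ "&&") :
    splitSpec ts = [ts] := by
  induction ts with
  | nil => rfl
  | cons t ts ih =>
      have ht : t ≠ "&&" := h t (by simp)
      have := ih (fun x hx => h x (by simp [hx]))
      unfold splitSpec
      rw [this]
      simp [ht]

theorem sepsFM_nil_no_sep (ts : List String) (h : sepsFM ts 0 = []) : ∀ x ∈ ts, x ≠ "&&" := by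
  induction ts with
  | nil => simp
  | cons t ts ih =>
      rw [sepsFM_cons t ts 0] at h
      have ht : t ≠ "&&" := by
        intro he; rw [he] at h; simp at h
      have h' : sepsFM ts 1 = [] := by
        simpa [ht] using h
      rw [sepsFM_shift ts 1] at h'
      have hz : sepsFM ts 0 = [] := by simpa using h'
      intro x hx
      rcases List.mem_cons.mp hx with rfl | hx'
      · exact ht
      · exact ih hz x hx'

theorem slice_cons_take (t : String) (ts : List String) (i : Int) (hi : 0 ≤ i) :
    PySem.List.slice (t :: ts) (some 0) (some (i + 1)) = t :: PySem.List.slice ts (some 0) (some i) := by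
  rw [PySem.List.slice_toNat _ (by omega) (by omega), PySem.List.slice_toNat _ (by omega) hi]
  have h2 : (i + 1).toNat = i.toNat + 1 := by omega
  rw [h2]
  simp

theorem gB_main (ts : List String) :
    gB ts (-1 :: (sepsFM ts 0 ++ [(ts.length : Int)])) = splitSpec ts := by
  induction ts with
  | nil => decide
  | cons t ts ih =>
      have hsep : sepsFM (t :: ts) 0 =
          (if t = "&&" then [(0 : Int)] else []) ++ (sepsFM ts 0).map (· + 1) := by
        rw [sepsFM_cons t ts 0, show (0 : Int) + 1 = 1 from rfl,
            sepsFM_shift ts 1]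
      have hlen : ((t :: ts).length : Int) = (ts.length : Int) + 1 := by
        simp
      have hnn : ∀ b ∈ sepsFM ts 0 ++ [(ts.length : Int)], 0 ≤ b := by
        intro b hb
        rcases List.mem_append.mp hb with h | h
        · exact sepsFM_nonneg ts b h
        · simp at h; omega
      by_cases ht : t = "&&"
      · subst ht
        rw [hsep, hlen, if_pos rfl, List.singleton_append, List.cons_append]
        rw [show gB ("&&" :: ts)
              (-1 :: ((0 : Int) :: ((sepsFM ts 0).map (· + 1) ++ [(ts.length : Int) + 1]))) =
            PySem.List.slice ("&&" :: ts) (some ((-1) + 1)) (some 0) ::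
            gB ("&&" :: ts) ((0 : Int) :: ((sepsFM ts 0).map (· + 1) ++ [(ts.length : Int) + 1])) from rfl]
        have hform : (0 : Int) :: ((sepsFM ts 0).map (· + 1) ++ [(ts.length : Int) + 1]) =
            ((-1) :: (sepsFM ts 0 ++ [(ts.length : Int)])).map (· + 1) := by
          simp
        rw [hform, gB_shift "&&" ts (-1) _ (by omega) hnn, ih]
        have hz : PySem.List.slice ("&&" :: ts) (some ((-1) + 1)) (some 0) = [] := by
          rw [show (-1 : Int) + 1 = 0 from rfl,
              PySem.List.slice_toNat _ (by omega) (by omega)]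
          simp
        rw [hz, splitSpec_cons_sep]
      · rw [hsep, hlen]
        simp only [ht, if_false, List.nil_append]
        rcases hS : sepsFM ts 0 with _ | ⟨i, S'⟩
        · -- no separators at all
          simp only [List.map_nil, List.nil_append, gB]
          rw [show (-1 : Int) + 1 = 0 from rfl,
              PySem.List.slice_toNat _ (by omega) (by positivity)]
          have h1 : ((ts.length : Int) + 1).toNat = ts.length + 1 := by omega
          rw [h1]
          simp only [Int.toNat_zero, List.drop_zero, Nat.sub_zero]
          rw [List.take_of_length_le (by simp)]
          rw [splitSpec_no_sep (t :: ts)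
              (by intro x hx
                  rcases List.mem_cons.mp hx with rfl | hx'
                  · exact ht
                  · exact sepsFM_nil_no_sep ts hS x hx')]
        · have hi : 0 ≤ i := sepsFM_nonneg ts i (by rw [hS]; simp)
          simp only [List.map_cons, List.cons_append]
          rw [show gB (t :: ts)
                (-1 :: ((i + 1) :: (S'.map (· + 1) ++ [(ts.length : Int) + 1]))) =
              PySem.List.slice (t :: ts) (some ((-1) + 1)) (some (i + 1)) ::
              gB (t :: ts) ((i + 1) :: (S'.map (· + 1) ++ [(ts.length : Int) + 1])) from rfl]
          have hform : (i + 1) :: (S'.map (· + 1) ++ [(ts.length : Int) + 1]) =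
              (i :: (S' ++ [(ts.length : Int)])).map (· + 1) := by
            simp
          have hnn' : ∀ b ∈ i :: (S' ++ [(ts.length : Int)]), 0 ≤ b := by
            intro b hb
            rcases List.mem_cons.mp hb with rfl | hb'
            · exact hi
            · exact hnn b (by rw [hS, List.cons_append]; exact List.mem_cons_of_mem i hb')
          rw [hform]
          rw [show gB (t :: ts) ((i :: (S' ++ [(ts.length : Int)])).map (· + 1)) =
              gB ts (i :: (S' ++ [(ts.length : Int)])) from
            gB_shift t ts i _ (by omega) (fun b hb => hnn' b (List.mem_cons_of_mem i hb))]
          have hIH := ih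
          rw [hS, List.cons_append] at hIH
          have hIH' : PySem.List.slice ts (some ((-1) + 1)) (some i) ::
              gB ts (i :: (S' ++ [(ts.length : Int)])) = splitSpec ts := by
            rw [← hIH]; rfl
          rw [show (-1 : Int) + 1 = 0 from rfl] at hIH' ⊢
          rw [slice_cons_take t ts i hi]
          rw [splitSpec_cons_ne t ts ht _ _ hIH'.symm]

-- ===== VERDICT (by name: the statement is the Claim_ definition above) =====
theorem split_commands_spec : Claim_equal_split_commands := by
  intro s _ _
  unfold Spec_split_commands split_commands split_commands_alt
  by_cases hs : s = ""
  · simp [hs]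
  · simp only [hs, if_false]
    rw [lexers_agree s, foldl_stepA_main, gB_eq_zip_map, ← gB_main (lexB s)]
    rfl
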